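-- pv_equiv track=rewrite | github.com/arrnavb-cmd/Patternos | app/intelligence/visual/vision_service.py | _infer_lifestyle
-- ===== SOURCE A (Python) =====
-- from typing import Dict, List, Optional
--
-- def _infer_lifestyle(labels: List) -> List[str]:
--     lifestyle = set()
--     terms = [l['name'].lower() for l in labels]
--
--     if any(t in terms for t in ['gym', 'fitness', 'workout']):
--         lifestyle.add('fitness_enthusiast')
--     if any(t in terms for t in ['makeup', 'beauty', 'cosmetic']):
--         lifestyle.add('beauty_lover')
--     if any(t in terms for t in ['organic', 'natural', 'healthy']):
--         lifestyle.add('health_conscious')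
--
--     return list(lifestyle)
-- ===== SOURCE B (Python) =====
-- from typing import Dict, List, Optional
--
-- _KEYWORD_TAG = {
--     'gym': 'fitness_enthusiast', 'fitness': 'fitness_enthusiast', 'workout': 'fitness_enthusiast',
--     'makeup': 'beauty_lover', 'beauty': 'beauty_lover', 'cosmetic': 'beauty_lover',
--     'organic': 'health_conscious', 'natural': 'health_conscious', 'healthy': 'health_conscious',
-- }
--
-- def _infer_lifestyle(labels: List) -> List[str]:
--     hits = set()
--     for l in labels:
--         tag = _KEYWORD_TAG.get(l['name'].lower())
--         if tag is not None:
--             hits.add(tag)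
--     return [t for t in ('fitness_enthusiast', 'beauty_lover', 'health_conscious') if t in hits]
-- ===== Notes on version B (the rewrite author's own statement) =====
-- stated objective: idiomatic
-- what changed: Replaces the three any()-membership scans over the terms list and the unordered result set with a single pass over the labels through a keyword-to-tag dictionary, emitting matched tags in a fixed order.
import Mathlib
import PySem

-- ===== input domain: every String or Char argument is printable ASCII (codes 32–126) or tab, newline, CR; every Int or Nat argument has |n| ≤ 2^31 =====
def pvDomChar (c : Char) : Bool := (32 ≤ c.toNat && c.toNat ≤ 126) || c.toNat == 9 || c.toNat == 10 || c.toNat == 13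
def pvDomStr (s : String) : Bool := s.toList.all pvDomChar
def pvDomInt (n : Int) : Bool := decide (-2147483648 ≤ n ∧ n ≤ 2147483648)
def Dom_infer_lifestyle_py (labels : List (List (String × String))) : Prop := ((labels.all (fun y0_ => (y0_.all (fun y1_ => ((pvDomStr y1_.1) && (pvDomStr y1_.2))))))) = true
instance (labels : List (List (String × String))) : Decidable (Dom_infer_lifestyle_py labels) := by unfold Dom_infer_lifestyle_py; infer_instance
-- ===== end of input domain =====

-- B replaces A's three any()-scans over the term list and its unordered result set by one
-- pass through a keyword→tag dictionary, emitting the matched tags in a fixed order (idiomatic).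
-- A raises KeyError on a label without 'name'; that (and hash-order-dependent multi-tag
-- outputs) is excluded by Pre_ below.

-- ===== PORT A =====
-- l['name'].lower(): first-match lookup in the association list; total via getD "",
-- the KeyError case is excluded by Pre_infer_lifestyle_py.
def pvLowerName (l : List (String × String)) : String :=
  PySem.Str.lower (((PySem.Dict.mk l).get? "name").getD "")

def infer_lifestyle_py (labels : List (List (String × String))) : List String :=
  let lifestyle : PySem.Set String := PySem.Set.ofList []
  let terms := labels.map (fun l => pvLowerName l)
  let lifestyle := if (["gym", "fitness", "workout"].any (fun t => terms.contains t)) then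
      PySem.Set.add lifestyle "fitness_enthusiast" else lifestyle
  let lifestyle := if (["makeup", "beauty", "cosmetic"].any (fun t => terms.contains t)) then
      PySem.Set.add lifestyle "beauty_lover" else lifestyle
  let lifestyle := if (["organic", "natural", "healthy"].any (fun t => terms.contains t)) then
      PySem.Set.add lifestyle "health_conscious" else lifestyle
  lifestyle   -- list(lifestyle): |lifestyle| ≤ 1 under Pre_, so order is determined

-- ===== PORT B =====
def pvKwTag : PySem.Dict String String := PySem.Dict.ofList
  [("gym", "fitness_enthusiast"), ("fitness", "fitness_enthusiast"), ("workout", "fitness_enthusiast"),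
   ("makeup", "beauty_lover"), ("beauty", "beauty_lover"), ("cosmetic", "beauty_lover"),
   ("organic", "health_conscious"), ("natural", "health_conscious"), ("healthy", "health_conscious")]

def pvHitsLoop (labels : List (List (String × String))) (hits : PySem.Set String) : PySem.Set String :=
  match labels with
  | [] => hits
  | l :: rest =>
      match PySem.Dict.get? pvKwTag (pvLowerName l) with
      | some tag => pvHitsLoop rest (PySem.Set.add hits tag)
      | none => pvHitsLoop rest hits

def infer_lifestyle_py_alt (labels : List (List (String × String))) : List String :=
  let hits := pvHitsLoop labels PySem.Set.empty
  ["fitness_enthusiast", "beauty_lover", "health_conscious"].filter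
    (fun t => PySem.Set.contains hits t)

-- ===== PRECONDITION & SPEC =====
def pvCatHit (labels : List (List (String × String))) (kws : List String) : Bool :=
  labels.any (fun l => kws.contains (pvLowerName l))

-- Pre_ excludes labels without a 'name' key (A raises KeyError there) and inputs matching
-- two or more keyword categories, where A's list(set) order is hash-seed dependent (an
-- accident of CPython's set iteration order, not a specified value).
def Pre_infer_lifestyle_py (labels : List (List (String × String))) : Prop :=
  (∀ l ∈ labels, ((PySem.Dict.mk l).get? "name").isSome) ∧
  ((if pvCatHit labels ["gym", "fitness", "workout"] then 1 else 0) +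
   (if pvCatHit labels ["makeup", "beauty", "cosmetic"] then 1 else 0) +
   (if pvCatHit labels ["organic", "natural", "healthy"] then 1 else 0) ≤ (1 : Nat))
instance (labels : List (List (String × String))) : Decidable (Pre_infer_lifestyle_py labels) := by
  unfold Pre_infer_lifestyle_py; infer_instance

def pvWitness_infer_lifestyle_py : (List (List (String × String))) :=
  [[("name", "Gym")], [("name", "coffee")]]

def Spec_infer_lifestyle_py (labels : List (List (String × String))) (out : List String) : Prop := out = infer_lifestyle_py_alt labels
instance (labels : List (List (String × String))) (out : List String) : Decidable (Spec_infer_lifestyle_py labels out) := by unfold Spec_infer_lifestyle_py; infer_instance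

-- ===== CLAIM (what is proved, stated in full; the proofs are below) =====
def Claim_equal_infer_lifestyle_py : Prop := ∀ (labels : List (List (String × String))), Dom_infer_lifestyle_py labels → Pre_infer_lifestyle_py labels → Spec_infer_lifestyle_py labels (infer_lifestyle_py labels)

-- ===== LEMMAS AND PROOFS =====

-- the keyword→tag dictionary, read backwards: which keys map to a given tag
theorem get?_pvKwTag_eq_some (s t : String) :
    PySem.Dict.get? pvKwTag s = some t ↔
      (s ∈ ["gym", "fitness", "workout"] ∧ t = "fitness_enthusiast") ∨
      (s ∈ ["makeup", "beauty", "cosmetic"] ∧ t = "beauty_lover") ∨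
      (s ∈ ["organic", "natural", "healthy"] ∧ t = "health_conscious") := by
  have hmk : pvKwTag = PySem.Dict.mk
      [("gym", "fitness_enthusiast"), ("fitness", "fitness_enthusiast"), ("workout", "fitness_enthusiast"),
       ("makeup", "beauty_lover"), ("beauty", "beauty_lover"), ("cosmetic", "beauty_lover"),
       ("organic", "health_conscious"), ("natural", "health_conscious"), ("healthy", "health_conscious")] := by
    decide
  rw [hmk]
  simp only [PySem.Dict.get?_mk_cons, beq_iff_eq]
  split_ifs <;> simp_all [eq_comm, PySem.Dict.get?]

theorem mem_pvHitsLoop (labels : List (List (String × String))) (hits : PySem.Set String)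
    (t : String) :
    t ∈ pvHitsLoop labels hits ↔
      t ∈ hits ∨ ∃ l ∈ labels, PySem.Dict.get? pvKwTag (pvLowerName l) = some t := by
  induction labels generalizing hits with
  | nil => simp [pvHitsLoop]
  | cons l rest ih =>
    simp only [pvHitsLoop]
    cases hgt : PySem.Dict.get? pvKwTag (pvLowerName l) with
    | none =>
      rw [ih]
      simp only [List.mem_cons]
      constructor
      · rintro (h | ⟨x, hx, hs⟩)
        · exact Or.inl h
        · exact Or.inr ⟨x, Or.inr hx, hs⟩
      · rintro (h | ⟨x, (rfl | hx), hs⟩)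
        · exact Or.inl h
        · simp [hgt] at hs
        · exact Or.inr ⟨x, hx, hs⟩
    | some tag =>
      rw [ih]
      simp only [PySem.Set.mem_add, List.mem_cons]
      constructor
      · rintro ((h | rfl) | ⟨x, hx, hs⟩)
        · exact Or.inl h
        · exact Or.inr ⟨l, Or.inl rfl, hgt⟩
        · exact Or.inr ⟨x, Or.inr hx, hs⟩
      · rintro (h | ⟨x, (rfl | hx), hs⟩)
        · exact Or.inl (Or.inl h)
        · rw [hgt] at hs; exact Or.inl (Or.inr (Option.some.inj hs).symm)
        · exact Or.inr ⟨x, hx, hs⟩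

theorem contains_hits_iff (labels : List (List (String × String))) (t : String) :
    PySem.Set.contains (pvHitsLoop labels PySem.Set.empty) t = true ↔
      ∃ l ∈ labels, PySem.Dict.get? pvKwTag (pvLowerName l) = some t := by
  rw [PySem.Set.contains_iff, mem_pvHitsLoop]
  simp [PySem.Set.empty]

-- A's first condition (any keyword in terms) expressed over labels
theorem anyKw_iff (labels : List (List (String × String))) (kws : List String) :
    (kws.any (fun t => (labels.map (fun l => pvLowerName l)).contains t) = true) ↔
      ∃ l ∈ labels, pvLowerName l ∈ kws := by
  simp only [List.any_eq_true, List.contains_iff_mem, List.mem_map]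
  constructor
  · rintro ⟨t, ht, l, hl, rfl⟩; exact ⟨l, hl, ht⟩
  · rintro ⟨l, hl, ht⟩; exact ⟨pvLowerName l, ht, l, hl, rfl⟩

theorem contains_hits_fitness (labels : List (List (String × String))) :
    PySem.Set.contains (pvHitsLoop labels PySem.Set.empty) "fitness_enthusiast" =
      (["gym", "fitness", "workout"].any
        (fun t => (labels.map (fun l => pvLowerName l)).contains t)) := by
  rw [Bool.eq_iff_iff, contains_hits_iff, anyKw_iff]
  constructor
  · rintro ⟨l, hl, hs⟩
    rw [get?_pvKwTag_eq_some] at hs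
    rcases hs with ⟨hmem, _⟩ | ⟨_, h⟩ | ⟨_, h⟩ <;> first | exact ⟨l, hl, hmem⟩ | simp at h
  · rintro ⟨l, hl, hmem⟩
    exact ⟨l, hl, (get?_pvKwTag_eq_some _ _).mpr (Or.inl ⟨hmem, rfl⟩)⟩

theorem contains_hits_beauty (labels : List (List (String × String))) :
    PySem.Set.contains (pvHitsLoop labels PySem.Set.empty) "beauty_lover" =
      (["makeup", "beauty", "cosmetic"].any
        (fun t => (labels.map (fun l => pvLowerName l)).contains t)) := by
  rw [Bool.eq_iff_iff, contains_hits_iff, anyKw_iff]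
  constructor
  · rintro ⟨l, hl, hs⟩
    rw [get?_pvKwTag_eq_some] at hs
    rcases hs with ⟨_, h⟩ | ⟨hmem, _⟩ | ⟨_, h⟩ <;> first | exact ⟨l, hl, hmem⟩ | simp at h
  · rintro ⟨l, hl, hmem⟩
    exact ⟨l, hl, (get?_pvKwTag_eq_some _ _).mpr (Or.inr (Or.inl ⟨hmem, rfl⟩))⟩

theorem contains_hits_health (labels : List (List (String × String))) :
    PySem.Set.contains (pvHitsLoop labels PySem.Set.empty) "health_conscious" =
      (["organic", "natural", "healthy"].any
        (fun t => (labels.map (fun l => pvLowerName l)).contains t)) := by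
  rw [Bool.eq_iff_iff, contains_hits_iff, anyKw_iff]
  constructor
  · rintro ⟨l, hl, hs⟩
    rw [get?_pvKwTag_eq_some] at hs
    rcases hs with ⟨_, h⟩ | ⟨_, h⟩ | ⟨hmem, _⟩ <;> first | exact ⟨l, hl, hmem⟩ | simp at h
  · rintro ⟨l, hl, hmem⟩
    exact ⟨l, hl, (get?_pvKwTag_eq_some _ _).mpr (Or.inr (Or.inr ⟨hmem, rfl⟩))⟩

-- ===== VERDICT (by name: the statement is the Claim_ definition above) =====
theorem infer_lifestyle_py_spec : Claim_equal_infer_lifestyle_py := by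
  intro labels _ _
  unfold Spec_infer_lifestyle_py
  simp only [infer_lifestyle_py, infer_lifestyle_py_alt, List.filter,
    contains_hits_fitness, contains_hits_beauty, contains_hits_health]
  cases ["gym", "fitness", "workout"].any
      (fun t => (labels.map (fun l => pvLowerName l)).contains t) <;>
    cases ["makeup", "beauty", "cosmetic"].any
        (fun t => (labels.map (fun l => pvLowerName l)).contains t) <;>
      cases ["organic", "natural", "healthy"].any
          (fun t => (labels.map (fun l => pvLowerName l)).contains t) <;>
        rfl
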